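-- pv_equiv track=rewrite | github.com/LorenzoDoremi/PythonImpl | Graph/Graph.py | f_diff
-- ===== SOURCE A (Python) =====
-- def f_diff(set1, set2):
--     diff = False
--     for item in set1:
--         if item not in set2:
--             diff = True
--     for item2 in set2:
--         if item2 not in set1:
--             diff = True
--     return diff
-- ===== SOURCE B (Python) =====
-- def f_diff(set1, set2):
--     return set(set1) != set(set2)
-- ===== Notes on version B (the rewrite author's own statement) =====
-- stated objective: simpler
-- what changed: Replaces the two membership-scanning loops with the diff flag by a single set-equality test: build both collections as sets once and return their inequality.
import Mathlib
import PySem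

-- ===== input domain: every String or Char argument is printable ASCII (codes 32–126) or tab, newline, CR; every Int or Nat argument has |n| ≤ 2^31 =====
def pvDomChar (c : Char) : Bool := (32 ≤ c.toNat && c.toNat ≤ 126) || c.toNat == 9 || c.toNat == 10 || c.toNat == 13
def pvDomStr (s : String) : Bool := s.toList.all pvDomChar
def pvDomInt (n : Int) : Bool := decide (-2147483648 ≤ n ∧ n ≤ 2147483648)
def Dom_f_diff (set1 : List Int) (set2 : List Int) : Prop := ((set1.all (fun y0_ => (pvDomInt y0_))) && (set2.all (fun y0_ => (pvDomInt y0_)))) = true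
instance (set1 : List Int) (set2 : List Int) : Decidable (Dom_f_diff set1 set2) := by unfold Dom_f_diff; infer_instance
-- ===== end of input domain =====

-- ===== PORT A =====
def f_diff (set1 : List Int) (set2 : List Int) : Bool :=
  let diff := set1.foldl (fun d item => if set2.contains item then d else true) false
  set2.foldl (fun d item2 => if set1.contains item2 then d else true) diff

-- ===== PORT B =====
def f_diff_alt (set1 : List Int) (set2 : List Int) : Bool :=
  !(PySem.Set.equal (PySem.Set.ofList set1) (PySem.Set.ofList set2))

-- ===== PRECONDITION & SPEC =====
def Spec_f_diff (set1 : List Int) (set2 : List Int) (out : Bool) : Prop := out = f_diff_alt set1 set2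
instance (set1 : List Int) (set2 : List Int) (out : Bool) : Decidable (Spec_f_diff set1 set2 out) := by unfold Spec_f_diff; infer_instance

-- ===== CLAIM (what is proved, stated in full; the proofs are below) =====
def Claim_equal_f_diff : Prop := ∀ (set1 : List Int) (set2 : List Int), Dom_f_diff set1 set2 → Spec_f_diff set1 set2 (f_diff set1 set2)

-- ===== LEMMAS AND PROOFS =====

-- a flag-setting loop is an 'any': foldl over 'if p x then d else true' ORs in 'not p x' per element
theorem foldl_flag (l : List Int) (p : Int → Bool) (b : Bool) :
    l.foldl (fun d x => if p x then d else true) b = (b || l.any (fun x => !p x)) := by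
  induction l generalizing b with
  | nil => simp
  | cons x xs ih =>
    simp only [List.foldl_cons, List.any_cons, ih]
    by_cases h : p x = true <;> simp [h]

theorem f_diff_eq_any (set1 set2 : List Int) :
    f_diff set1 set2 = (set1.any (fun x => !set2.contains x) || set2.any (fun x => !set1.contains x)) := by
  simp only [f_diff, foldl_flag, Bool.false_or]

-- ===== VERDICT (by name: the statement is the Claim_ definition above) =====
theorem f_diff_spec : Claim_equal_f_diff := by
  intro set1 set2 _
  unfold Spec_f_diff f_diff_alt
  rw [f_diff_eq_any]
  by_cases h : ∀ x : Int, x ∈ set1 ↔ x ∈ set2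
  · have he : PySem.Set.equal (PySem.Set.ofList set1) (PySem.Set.ofList set2) = true :=
      (PySem.Set.equal_iff _ _).mpr (fun x => by
        simp only [PySem.Set.mem_ofList]; exact h x)
    simp only [he, Bool.not_true, Bool.or_eq_false_iff, List.any_eq_false]
    exact ⟨fun x hx => by simpa using (h x).mp hx, fun x hx => by simpa using (h x).mpr hx⟩
  · have he : PySem.Set.equal (PySem.Set.ofList set1) (PySem.Set.ofList set2) = false := by
      rw [Bool.eq_false_iff]
      intro hc
      exact h (fun x => by
        have := (PySem.Set.equal_iff _ _).mp hc x
        simpa [PySem.Set.mem_ofList] using this)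
    simp only [he, Bool.not_false, Bool.or_eq_true, List.any_eq_true]
    simp only [not_forall] at h
    obtain ⟨x, hx⟩ := h
    by_cases hx1 : x ∈ set1
    · have hx2 : x ∉ set2 := fun hx2 => hx (iff_of_true hx1 hx2)
      exact Or.inl ⟨x, hx1, by simpa using hx2⟩
    · have hx2 : x ∈ set2 := by
        by_contra hx2; exact hx (iff_of_false hx1 hx2)
      exact Or.inr ⟨x, hx2, by simpa using hx1⟩
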